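-- pv_equiv track=rewrite | github.com/Mafiv/Competitive-Programing-Solutions-Stack | A2SV G6 - Round #2 02-Mar-2025/C - The Splitting Game 288301.py | max_f_a_plus_f_b
-- ===== SOURCE A (Python) =====
-- def max_f_a_plus_f_b(n, s):
--     prefix_count = set()
--     suffix_count = {}
--     for ch in s:
--         suffix_count[ch] = suffix_count.get(ch, 0) + 1
--     max_value = 0
--     for i in range(n - 1):
--         prefix_count.add(s[i])
--         suffix_count[s[i]] -= 1
--         if suffix_count[s[i]] == 0:
--             del suffix_count[s[i]]
--         max_value = max(max_value, len(prefix_count) + len(suffix_count))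
--     return max_value
-- ===== SOURCE B (Python) =====
-- def max_f_a_plus_f_b(n, s):
--     suf = [0] * (len(s) + 1)
--     seen = set()
--     for j in range(len(s) - 1, -1, -1):
--         seen.add(s[j])
--         suf[j] = len(seen)
--     pref = set()
--     best = 0
--     for i in range(n - 1):
--         pref.add(s[i])
--         best = max(best, len(pref) + suf[i + 1])
--     return best
-- ===== Notes on version B (the rewrite author's own statement) =====
-- stated objective: alternative
-- what changed: B replaces A's decrement-and-delete suffix counter dict, updated inside the split loop, by a suffix-distinct-count table precomputed in a separate right-to-left set pass, so the split loop only reads suf[i+1].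
import Mathlib
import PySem

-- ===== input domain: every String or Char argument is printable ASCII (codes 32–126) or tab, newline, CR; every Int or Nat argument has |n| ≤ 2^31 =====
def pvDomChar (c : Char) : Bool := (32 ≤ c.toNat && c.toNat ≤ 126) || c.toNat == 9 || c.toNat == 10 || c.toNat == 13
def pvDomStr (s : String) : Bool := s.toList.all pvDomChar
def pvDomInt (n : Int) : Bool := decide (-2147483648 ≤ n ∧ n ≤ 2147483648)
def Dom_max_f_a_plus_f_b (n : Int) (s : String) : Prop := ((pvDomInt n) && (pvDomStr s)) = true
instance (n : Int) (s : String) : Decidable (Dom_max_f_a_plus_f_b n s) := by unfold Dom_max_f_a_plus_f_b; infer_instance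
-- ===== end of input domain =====

-- B replaces A's decrement-and-delete suffix counter dict, updated inside the split loop, by a
-- suffix-distinct-count table precomputed in a right-to-left set pass; same cost, different decomposition.

-- ===== PORT A =====
-- body of A's 'for i in range(n - 1)' loop (prefix set, suffix counter dict, running max)
def pvStepA (cs : List Char) (st : PySem.Set Char × PySem.Dict Char Int × Int) (i : Int) :
    PySem.Set Char × PySem.Dict Char Int × Int :=
  match PySem.List.pyGet? cs i with
  | none => st  -- IndexError on s[i]: excluded by Pre_
  | some c =>
    let pre := PySem.Set.add st.1 c
    let d1 := st.2.1.insert c (st.2.1.getD c 0 - 1)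
    let d2 := if d1.getD c 0 == 0 then d1.erase c else d1
    (pre, d2, max st.2.2 ((pre.length : Int) + (d2.size : Int)))

def max_f_a_plus_f_b (n : Int) (s : String) : Int :=
  let cs := s.toList
  let suffix := cs.foldl (fun d ch => d.insert ch (d.getD ch 0 + 1)) PySem.Dict.empty
  let res := (PySem.List.pyRange 0 (n - 1) 1).foldl (pvStepA cs) (PySem.Set.empty, suffix, 0)
  res.2.2

-- ===== PORT B =====
-- body of B's backward table-building loop 'for j in range(len(s)-1, -1, -1)'
def pvStepSuf (cs : List Char) (st : PySem.Set Char × List Int) (j : Int) :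
    PySem.Set Char × List Int :=
  match PySem.List.pyGet? cs j with
  | none => st
  | some c =>
    let seen := PySem.Set.add st.1 c
    (seen, PySem.List.pySetD st.2 j (seen.length : Int))

-- body of B's forward split loop 'for i in range(n - 1)'
def pvStepB (cs : List Char) (suf : List Int) (st : PySem.Set Char × Int) (i : Int) :
    PySem.Set Char × Int :=
  match PySem.List.pyGet? cs i with
  | none => st  -- IndexError on s[i]: excluded by Pre_
  | some c =>
    let pref := PySem.Set.add st.1 c
    (pref, max st.2 ((pref.length : Int) + PySem.List.pyGetD suf (i + 1) 0))

def max_f_a_plus_f_b_alt (n : Int) (s : String) : Int :=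
  let cs := s.toList
  let suf0 := List.replicate (cs.length + 1) (0 : Int)
  let suf := ((PySem.List.pyRange ((cs.length : Int) - 1) (-1) (-1)).foldl
      (pvStepSuf cs) (PySem.Set.empty, suf0)).2
  let res := (PySem.List.pyRange 0 (n - 1) 1).foldl (pvStepB cs suf) (PySem.Set.empty, 0)
  res.2

-- ===== PRECONDITION & SPEC =====
-- A (and B) raise IndexError on s[i] as soon as the loop reaches i = len(s), i.e. when n - 1 > len(s).
def Pre_max_f_a_plus_f_b (n : Int) (s : String) : Prop := n - 1 ≤ (s.toList.length : Int)
instance (n : Int) (s : String) : Decidable (Pre_max_f_a_plus_f_b n s) := by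
  unfold Pre_max_f_a_plus_f_b; infer_instance

def pvWitness_max_f_a_plus_f_b : Int × String := (3, "abca")

def Spec_max_f_a_plus_f_b (n : Int) (s : String) (out : Int) : Prop := out = max_f_a_plus_f_b_alt n s
instance (n : Int) (s : String) (out : Int) : Decidable (Spec_max_f_a_plus_f_b n s out) := by
  unfold Spec_max_f_a_plus_f_b; infer_instance

-- ===== CLAIM (what is proved, stated in full; the proofs are below) =====
def Claim_equal_max_f_a_plus_f_b : Prop := ∀ (n : Int) (s : String), Dom_max_f_a_plus_f_b n s → Pre_max_f_a_plus_f_b n s → Spec_max_f_a_plus_f_b n s (max_f_a_plus_f_b n s)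

-- ===== LEMMAS AND PROOFS =====

-- invariant of A's dict: it is the counter of the remaining suffix r
def pvInv (r : List Char) (d : PySem.Dict Char Int) : Prop :=
  d.keys.Nodup ∧ ∀ c, d.get? c = if r.count c = 0 then none else some (r.count c)

-- get? through erase
theorem pv_get?_erase {κ ν : Type} [BEq κ] [LawfulBEq κ] [DecidableEq κ] (d : PySem.Dict κ ν) (c c' : κ) :
    (d.erase c).get? c' = if c' = c then none else d.get? c' := by
  rcases d with ⟨items⟩
  simp only [PySem.Dict.erase, PySem.Dict.get?]
  induction items with
  | nil => simp
  | cons p rest ih =>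
    by_cases h1 : p.1 = c <;> by_cases h2 : c' = c <;> by_cases h3 : p.1 = c' <;>
      simp_all

theorem pv_nodup_keys_erase {κ ν : Type} [BEq κ] (d : PySem.Dict κ ν) (c : κ)
    (h : d.keys.Nodup) : (d.erase c).keys.Nodup := by
  rcases d with ⟨items⟩
  simp only [PySem.Dict.erase, PySem.Dict.keys] at *
  exact h.sublist (List.Sublist.map _ List.filter_sublist)

-- a Nodup list with the same members as r has length r.toFinset.card
theorem pv_len_eq_card (r : List Char) (l : List Char) (hn : l.Nodup)
    (hm : ∀ c, c ∈ l ↔ c ∈ r) : l.length = r.toFinset.card := by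
  rw [← List.toFinset_card_of_nodup hn]
  congr 1
  ext c
  simp [hm]

-- size of a dict satisfying the invariant
theorem pv_size_of_inv (r : List Char) (d : PySem.Dict Char Int) (h : pvInv r d) :
    d.size = r.toFinset.card := by
  obtain ⟨hn, hg⟩ := h
  have hlen : d.size = d.keys.length := by
    simp [PySem.Dict.size, PySem.Dict.keys]
  rw [hlen]
  apply pv_len_eq_card r _ hn
  intro c
  have h1 : d.get? c = none ↔ c ∉ d.keys := PySem.Dict.get?_eq_none_iff_not_mem_keys d c
  rw [hg c] at h1
  by_cases hc : r.count c = 0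
  · simp [hc] at h1
    exact iff_of_false h1 (by simpa using List.count_eq_zero.mp hc)
  · simp [hc] at h1
    exact iff_of_true h1 (List.count_pos_iff.mp (Nat.pos_of_ne_zero hc))

theorem pv_inv_counter (cs : List Char) : pvInv cs (PySem.Dict.counter cs) := by
  refine ⟨PySem.Dict.nodup_keys_counter cs, fun c => ?_⟩
  have hgd := PySem.Dict.getD_counter cs c
  have hct := PySem.Dict.contains_counter cs c
  by_cases hc : cs.count c = 0
  · have : (PySem.Dict.counter cs).contains c = false := by
      simp [hct, List.contains_eq_mem]
      exact List.count_eq_zero.mp hc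
    simp [hc, (PySem.Dict.get?_eq_none_iff_contains _ _).mpr this]
  · have hmem : c ∈ cs := List.count_pos_iff.mp (Nat.pos_of_ne_zero hc)
    have : (PySem.Dict.counter cs).contains c = true := by simp [hct, List.contains_eq_mem, hmem]
    rcases ho : (PySem.Dict.counter cs).get? c with _ | v
    · rw [PySem.Dict.get?_eq_none_iff_contains] at ho; simp [this] at ho
    · rw [PySem.Dict.getD_eq_get?_getD, ho] at hgd
      simp at hgd
      simp [hc, hgd]

-- one A-step preserves the invariant, consuming the head of the suffix
theorem pv_inv_step (c : Char) (r : List Char) (d : PySem.Dict Char Int) (h : pvInv (c :: r) d) :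
    pvInv r (let d1 := d.insert c (d.getD c 0 - 1);
             if d1.getD c 0 == 0 then d1.erase c else d1) := by
  obtain ⟨hn, hg⟩ := h
  have hgdc : d.getD c 0 = ((r.count c : Int) + 1) := by
    rw [PySem.Dict.getD_eq_get?_getD, hg c]
    simp [List.count_cons_self]
  have hins : ∀ c', (d.insert c (d.getD c 0 - 1)).get? c'
      = if c' = c then some ((r.count c : Int)) else d.get? c' := by
    intro c'
    rw [PySem.Dict.get?_insert]
    rw [hgdc]
    ring_nf
  have hd1c : (d.insert c (d.getD c 0 - 1)).getD c 0 = (r.count c : Int) := by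
    rw [PySem.Dict.getD_eq_get?_getD, hins c]; simp
  simp only []
  by_cases hz : r.count c = 0
  · rw [if_pos (by simp [hd1c, hz])]
    refine ⟨pv_nodup_keys_erase _ _ (PySem.Dict.nodup_keys_insert d c _ hn), fun c' => ?_⟩
    rw [pv_get?_erase, hins c']
    by_cases hcc : c' = c
    · simp [hcc, hz]
    · have hcc' : ¬ c = c' := fun hh => hcc hh.symm
      simp [hcc, hcc', hg c']
  · rw [if_neg (by simp [hd1c, hz])]
    refine ⟨PySem.Dict.nodup_keys_insert d c _ hn, fun c' => ?_⟩
    rw [hins c']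
    by_cases hcc : c' = c
    · simp [hcc, hz]
    · have hcc' : ¬ c = c' := fun hh => hcc hh.symm
      simp [hcc, hcc', hg c']

-- characterisation of B's suffix table after the backward loop
theorem pv_suf_loop (cs : List Char) (k : Nat) (hk : k ≤ cs.length)
    (seen : PySem.Set Char) (arr : List Int)
    (hlen : arr.length = cs.length + 1)
    (hmem : ∀ c, c ∈ seen ↔ c ∈ cs.drop k) (hnd : seen.Nodup) :
    ∀ j : Nat,
      (((PySem.List.pyRange ((k : Int) - 1) (-1) (-1)).foldl (pvStepSuf cs) (seen, arr)).2)[j]? =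
        if j < k then some (((cs.drop j).toFinset.card : Int)) else arr[j]? := by
  induction k generalizing seen arr with
  | zero =>
    intro j
    rw [show ((0 : Nat) : Int) - 1 = -1 by norm_num,
        PySem.List.pyRange_neg_one_eq_nil (by norm_num)]
    simp
  | succ k ih =>
    intro j
    have hklen : k < cs.length := hk
    rw [show ((k + 1 : Nat) : Int) - 1 = (k : Int) by push_cast; ring,
        PySem.List.pyRange_neg_one_cons (by omega : (-1 : Int) < (k : Int))]
    simp only [List.foldl_cons]
    have hget : PySem.List.pyGet? cs (k : Int) = some cs[k] := by
      rw [PySem.List.pyGet?_natCast]; exact List.getElem?_eq_getElem hklen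
    have hstep : pvStepSuf cs (seen, arr) (k : Int) =
        (PySem.Set.add seen cs[k],
         PySem.List.pySetD arr (k : Int) (((PySem.Set.add seen cs[k]).length : Int))) := by
      simp [pvStepSuf, hget]
    rw [hstep]
    have hdrop : cs.drop k = cs[k] :: cs.drop (k + 1) := List.drop_eq_getElem_cons hklen
    have hmem' : ∀ c, c ∈ PySem.Set.add seen cs[k] ↔ c ∈ cs.drop k := by
      intro c
      rw [PySem.Set.mem_add, hmem c, hdrop, List.mem_cons]
      tauto
    have hnd' : (PySem.Set.add seen cs[k]).Nodup := PySem.Set.nodup_add seen cs[k] hnd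
    have hlen2 : (PySem.List.pySetD arr (k : Int)
        (((PySem.Set.add seen cs[k]).length : Int))).length = cs.length + 1 := by
      rw [PySem.List.pySetD_natCast]; simp [hlen]
    have hrec := ih (le_of_lt hklen) _ _ hlen2 hmem' hnd' j
    rw [hrec]
    by_cases hj : j < k + 1
    · by_cases hjk : j < k
      · rw [if_pos hjk, if_pos hj]
      · have hjke : j = k := by omega
        subst hjke
        rw [if_neg hjk, if_pos hj, PySem.List.pySetD_natCast, List.getElem?_set]
        rw [if_pos rfl, if_pos (by omega)]
        have hcard := pv_len_eq_card (cs.drop j) _ hnd' hmem'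
        rw [hcard]
    · rw [if_neg hj, if_neg (by omega), PySem.List.pySetD_natCast, List.getElem?_set,
          if_neg (by omega)]

-- the two split loops agree, coupled by the invariant and the suffix table
theorem pv_main_loop (cs : List Char) (m : Int) (hm : m ≤ (cs.length : Int)) (suf : List Int)
    (hsuf : ∀ j : Nat, j ≤ cs.length → suf[j]? = some (((cs.drop j).toFinset.card : Int)))
    (a : Nat) (pre : PySem.Set Char) (mv : Int) (d : PySem.Dict Char Int)
    (hInv : pvInv (cs.drop a) d) :
    (((PySem.List.pyRange (a : Int) m 1).foldl (pvStepA cs) (pre, d, mv)).2.2) =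
    (((PySem.List.pyRange (a : Int) m 1).foldl (pvStepB cs suf) (pre, mv)).2) := by
  suffices H : ∀ (fuel : Nat) (a : Nat) (pre : PySem.Set Char) (mv : Int) (d : PySem.Dict Char Int),
      (m - (a : Int)).toNat ≤ fuel → pvInv (cs.drop a) d →
      (((PySem.List.pyRange (a : Int) m 1).foldl (pvStepA cs) (pre, d, mv)).2.2) =
      (((PySem.List.pyRange (a : Int) m 1).foldl (pvStepB cs suf) (pre, mv)).2) by
    exact H _ a pre mv d le_rfl hInv
  intro fuel
  induction fuel with
  | zero =>
    intro a pre mv d hfuel _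
    rw [PySem.List.pyRange_one_eq_nil (by omega)]
    simp
  | succ f ihf =>
    intro a pre mv d hfuel hInv
    by_cases hma : m ≤ (a : Int)
    · rw [PySem.List.pyRange_one_eq_nil hma]
      simp
    · have ham : (a : Int) < m := by omega
      have halen : a < cs.length := by omega
      rw [PySem.List.pyRange_one_cons ham]
      simp only [List.foldl_cons]
      have hget : PySem.List.pyGet? cs (a : Int) = some cs[a] := by
        rw [PySem.List.pyGet?_natCast]; exact List.getElem?_eq_getElem halen
      have hdrop : cs.drop a = cs[a] :: cs.drop (a + 1) := List.drop_eq_getElem_cons halen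
      have hInv' : pvInv (cs.drop (a + 1))
          (let d1 := d.insert cs[a] (d.getD cs[a] 0 - 1);
           if d1.getD cs[a] 0 == 0 then d1.erase cs[a] else d1) := by
        apply pv_inv_step
        rw [← hdrop]
        exact hInv
      have hstepA : pvStepA cs (pre, d, mv) (a : Int) =
          (PySem.Set.add pre cs[a],
           (let d1 := d.insert cs[a] (d.getD cs[a] 0 - 1);
            if d1.getD cs[a] 0 == 0 then d1.erase cs[a] else d1),
           max mv (((PySem.Set.add pre cs[a]).length : Int) +
             ((let d1 := d.insert cs[a] (d.getD cs[a] 0 - 1);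
               if d1.getD cs[a] 0 == 0 then d1.erase cs[a] else d1).size : Int))) := by
        simp only [pvStepA, hget]
      have hsz : ((let d1 := d.insert cs[a] (d.getD cs[a] 0 - 1);
            if d1.getD cs[a] 0 == 0 then d1.erase cs[a] else d1).size : Int)
          = PySem.List.pyGetD suf ((a : Int) + 1) 0 := by
        rw [pv_size_of_inv _ _ hInv']
        rw [show (a : Int) + 1 = ((a + 1 : Nat) : Int) by push_cast; ring,
            PySem.List.pyGetD_natCast, List.getD_eq_getElem?_getD, hsuf (a + 1) (by omega)]
        simp
      have hstepB : pvStepB cs suf (pre, mv) (a : Int) =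
          (PySem.Set.add pre cs[a],
           max mv (((PySem.Set.add pre cs[a]).length : Int) +
             PySem.List.pyGetD suf ((a : Int) + 1) 0)) := by
        simp only [pvStepB, hget]
      rw [hstepA, hstepB, hsz,
          show (a : Int) + 1 = ((a + 1 : Nat) : Int) by push_cast; ring]
      exact ihf (a + 1) _ _ _ (by omega) hInv'

-- ===== VERDICT (by name: the statement is the Claim_ definition above) =====
theorem max_f_a_plus_f_b_spec : Claim_equal_max_f_a_plus_f_b := by
  intro n s _ hpre
  unfold Spec_max_f_a_plus_f_b max_f_a_plus_f_b max_f_a_plus_f_b_alt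
  simp only []
  set cs := s.toList with hcs
  set suf := ((PySem.List.pyRange ((cs.length : Int) - 1) (-1) (-1)).foldl
      (pvStepSuf cs) (PySem.Set.empty, List.replicate (cs.length + 1) (0 : Int))).2 with hsufdef
  have hsuf : ∀ j : Nat, j ≤ cs.length → suf[j]? = some (((cs.drop j).toFinset.card : Int)) := by
    intro j hj
    rw [hsufdef, pv_suf_loop cs cs.length le_rfl PySem.Set.empty _
        (by simp) (by simp [PySem.Set.empty, List.drop_length]) (by simp [PySem.Set.empty]) j]
    by_cases hj2 : j < cs.length
    · rw [if_pos hj2]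
    · have hje : j = cs.length := by omega
      subst hje
      rw [if_neg hj2]
      simp [List.drop_length]
  have hcnt : cs.foldl (fun d ch => d.insert ch (d.getD ch 0 + 1)) PySem.Dict.empty
      = PySem.Dict.counter cs := PySem.Dict.foldl_insert_getD_add_one_eq_counter cs
  rw [hcnt]
  have hmain := pv_main_loop cs (n - 1) (by exact_mod_cast hpre) suf hsuf 0
      PySem.Set.empty 0 (PySem.Dict.counter cs) (by simpa using pv_inv_counter cs)
  simpa using hmain
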